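-- pv_equiv track=rewrite | github.com/t4zn/flora1 | app.py | generate_care_tips
-- ===== SOURCE A (Python) =====
-- def generate_care_tips(plant_name):
--     """Generate specific care tips for identified plants"""
--     plant_lower = plant_name.lower()
--
--     if any(word in plant_lower for word in ['succulent', 'cactus', 'aloe', 'jade']):
--         return ["Water only when soil is completely dry", "Provide bright, indirect light", "Use well-draining soil", "Avoid overwatering - less is more"]
--     elif any(word in plant_lower for word in ['orchid']):
--         return ["Water weekly by soaking method", "Provide bright, indirect light", "Use orchid bark mix", "Maintain 40-70% humidity"]
--     elif any(word in plant_lower for word in ['fern', 'boston fern']):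
--         return ["Keep soil consistently moist", "Provide high humidity", "Avoid direct sunlight", "Mist regularly but avoid waterlogged soil"]
--     elif any(word in plant_lower for word in ['peace lily', 'lily']):
--         return ["Water when soil surface is dry", "Tolerates low to bright light", "Flowers indicate good care", "Drooping leaves signal watering time"]
--     else:
--         return ["Provide appropriate light for species", "Water when topsoil feels dry", "Ensure good drainage", "Feed during growing season"]
-- ===== SOURCE B (Python) =====
-- def generate_care_tips(plant_name):
--     """Generate specific care tips for identified plants"""
--     plant_lower = plant_name.lower()
--     tips_by_category = [
--         ["Water only when soil is completely dry", "Provide bright, indirect light", "Use well-draining soil", "Avoid overwatering - less is more"],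
--         ["Water weekly by soaking method", "Provide bright, indirect light", "Use orchid bark mix", "Maintain 40-70% humidity"],
--         ["Keep soil consistently moist", "Provide high humidity", "Avoid direct sunlight", "Mist regularly but avoid waterlogged soil"],
--         ["Water when soil surface is dry", "Tolerates low to bright light", "Flowers indicate good care", "Drooping leaves signal watering time"],
--         ["Provide appropriate light for species", "Water when topsoil feels dry", "Ensure good drainage", "Feed during growing season"],
--     ]
--     keyword_index = [
--         ('succulent', 0), ('cactus', 0), ('aloe', 0), ('jade', 0),
--         ('orchid', 1),
--         ('fern', 2), ('boston fern', 2),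
--         ('peace lily', 3), ('lily', 3),
--     ]
--     best = min((idx for kw, idx in keyword_index if kw in plant_lower), default=4)
--     return tips_by_category[best]
-- ===== Notes on version B (the rewrite author's own statement) =====
-- stated objective: alternative
-- what changed: Replaced the ordered if/elif category chain by a flat keyword->category index: collect the category indices of all matching keywords, take the minimum (default 4), and index into a tips table; correctness follows because A returns the first (lowest-index) category containing a match.
import Mathlib
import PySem

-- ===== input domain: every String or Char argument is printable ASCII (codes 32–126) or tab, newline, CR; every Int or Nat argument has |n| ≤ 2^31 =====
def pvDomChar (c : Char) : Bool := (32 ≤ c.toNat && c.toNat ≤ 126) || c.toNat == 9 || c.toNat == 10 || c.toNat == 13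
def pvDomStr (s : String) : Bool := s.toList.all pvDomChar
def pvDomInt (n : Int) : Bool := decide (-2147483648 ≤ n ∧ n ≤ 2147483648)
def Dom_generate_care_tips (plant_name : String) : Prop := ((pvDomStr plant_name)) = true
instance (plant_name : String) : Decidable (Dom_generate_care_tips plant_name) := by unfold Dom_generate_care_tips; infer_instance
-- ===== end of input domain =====

-- B replaces A's ordered if/elif chain by a flat keyword->category index: minimum matching category index, then table lookup (alternative; same cost).

-- ===== PORT A =====
def generate_care_tips (plant_name : String) : List String :=
  let plant_lower := PySem.Str.lower plant_name
  if ["succulent", "cactus", "aloe", "jade"].any (fun word => PySem.Str.isIn word plant_lower) then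
    ["Water only when soil is completely dry", "Provide bright, indirect light", "Use well-draining soil", "Avoid overwatering - less is more"]
  else if ["orchid"].any (fun word => PySem.Str.isIn word plant_lower) then
    ["Water weekly by soaking method", "Provide bright, indirect light", "Use orchid bark mix", "Maintain 40-70% humidity"]
  else if ["fern", "boston fern"].any (fun word => PySem.Str.isIn word plant_lower) then
    ["Keep soil consistently moist", "Provide high humidity", "Avoid direct sunlight", "Mist regularly but avoid waterlogged soil"]
  else if ["peace lily", "lily"].any (fun word => PySem.Str.isIn word plant_lower) then
    ["Water when soil surface is dry", "Tolerates low to bright light", "Flowers indicate good care", "Drooping leaves signal watering time"]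
  else
    ["Provide appropriate light for species", "Water when topsoil feels dry", "Ensure good drainage", "Feed during growing season"]

-- ===== PORT B =====
def generate_care_tips_alt (plant_name : String) : List String :=
  let plant_lower := PySem.Str.lower plant_name
  let tips_by_category : List (List String) :=
    [ ["Water only when soil is completely dry", "Provide bright, indirect light", "Use well-draining soil", "Avoid overwatering - less is more"],
      ["Water weekly by soaking method", "Provide bright, indirect light", "Use orchid bark mix", "Maintain 40-70% humidity"],
      ["Keep soil consistently moist", "Provide high humidity", "Avoid direct sunlight", "Mist regularly but avoid waterlogged soil"],
      ["Water when soil surface is dry", "Tolerates low to bright light", "Flowers indicate good care", "Drooping leaves signal watering time"],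
      ["Provide appropriate light for species", "Water when topsoil feels dry", "Ensure good drainage", "Feed during growing season"] ]
  let keyword_index : List (String × Nat) :=
    [ ("succulent", 0), ("cactus", 0), ("aloe", 0), ("jade", 0),
      ("orchid", 1),
      ("fern", 2), ("boston fern", 2),
      ("peace lily", 3), ("lily", 3) ]
  -- min(..., default=4): fold min over the matching indices starting from 4
  let best := ((keyword_index.filter (fun p => PySem.Str.isIn p.1 plant_lower)).map Prod.snd).foldl min 4
  tips_by_category.getD best []

-- ===== PRECONDITION & SPEC =====
def Spec_generate_care_tips (plant_name : String) (out : List String) : Prop := out = generate_care_tips_alt plant_name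
instance (plant_name : String) (out : List String) : Decidable (Spec_generate_care_tips plant_name out) := by unfold Spec_generate_care_tips; infer_instance

-- ===== CLAIM (what is proved, stated in full; the proofs are below) =====
def Claim_equal_generate_care_tips : Prop := ∀ (plant_name : String), Dom_generate_care_tips plant_name → Spec_generate_care_tips plant_name (generate_care_tips plant_name)

-- ===== LEMMAS AND PROOFS =====

-- ===== VERDICT (by name: the statement is the Claim_ definition above) =====
theorem generate_care_tips_spec : Claim_equal_generate_care_tips := by
  intro plant_name _
  unfold Spec_generate_care_tips generate_care_tips generate_care_tips_alt
  simp only [List.any_cons, List.any_nil, List.filter_cons, List.filter_nil, Bool.or_false]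
  generalize PySem.Str.isIn "succulent" (PySem.Str.lower plant_name) = b1
  generalize PySem.Str.isIn "cactus" (PySem.Str.lower plant_name) = b2
  generalize PySem.Str.isIn "aloe" (PySem.Str.lower plant_name) = b3
  generalize PySem.Str.isIn "jade" (PySem.Str.lower plant_name) = b4
  generalize PySem.Str.isIn "orchid" (PySem.Str.lower plant_name) = b5
  generalize PySem.Str.isIn "fern" (PySem.Str.lower plant_name) = b6
  generalize PySem.Str.isIn "boston fern" (PySem.Str.lower plant_name) = b7
  generalize PySem.Str.isIn "peace lily" (PySem.Str.lower plant_name) = b8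
  generalize PySem.Str.isIn "lily" (PySem.Str.lower plant_name) = b9
  cases b1 <;> cases b2 <;> cases b3 <;> cases b4 <;> cases b5 <;>
    cases b6 <;> cases b7 <;> cases b8 <;> cases b9 <;> rfl
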